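-- pv_equiv track=rewrite | github.com/kimyenac/Algorithm | 프로그래머스/unrated/181837. 커피 심부름/커피 심부름.py | solution
-- ===== SOURCE A (Python) =====
-- def solution(order):
--     answer = 0
--
--     for menu in order:
--         if menu in ['iceamericano', 'americanoice', 'hotamericano', 'americanohot', 'americano', 'anything']:
--             answer += 4500
--         else:
--             answer += 5000
--
--     return answer
-- ===== SOURCE B (Python) =====
-- _PRICE = {'iceamericano': 4500, 'americanoice': 4500, 'hotamericano': 4500,
--           'americanohot': 4500, 'americano': 4500, 'anything': 4500}
--
-- def solution(order):
--     counts = {}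
--     for menu in order:
--         counts[menu] = counts.get(menu, 0) + 1
--     return sum(_PRICE.get(menu, 5000) * c for menu, c in counts.items())
-- ===== Notes on version B (the rewrite author's own statement) =====
-- stated objective: alternative
-- what changed: B aggregates the order into a frequency table (dict menu -> count) and then prices each distinct menu once through a 4500-price lookup table with default 5000, summing price*count, instead of branching on a six-name membership list and accumulating 4500/5000 per element.
import Mathlib
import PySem

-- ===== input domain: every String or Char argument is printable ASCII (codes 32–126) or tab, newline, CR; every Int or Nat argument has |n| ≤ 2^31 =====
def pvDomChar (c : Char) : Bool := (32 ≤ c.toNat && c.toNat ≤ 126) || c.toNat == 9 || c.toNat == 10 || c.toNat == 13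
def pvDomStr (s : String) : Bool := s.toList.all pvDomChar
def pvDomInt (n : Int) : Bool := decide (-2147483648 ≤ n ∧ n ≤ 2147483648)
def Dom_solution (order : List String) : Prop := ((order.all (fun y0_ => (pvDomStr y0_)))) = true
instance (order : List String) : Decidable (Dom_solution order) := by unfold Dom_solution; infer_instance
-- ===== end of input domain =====

-- header: B aggregates the order into a frequency table (menu -> count) and prices each distinct menu once via a price-lookup dict, instead of branching per element (objective: alternative decomposition).

-- ===== PORT A =====
def solution (order : List String) : Int :=
  order.foldl (fun answer menu =>
    if menu ∈ ["iceamericano", "americanoice", "hotamericano", "americanohot", "americano", "anything"]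
    then answer + 4500 else answer + 5000) 0

-- ===== PORT B =====
def pvPrice : PySem.Dict String Int :=
  PySem.Dict.ofList [("iceamericano", 4500), ("americanoice", 4500), ("hotamericano", 4500),
                     ("americanohot", 4500), ("americano", 4500), ("anything", 4500)]

def solution_alt (order : List String) : Int :=
  let counts : PySem.Dict String Int :=
    order.foldl (fun d menu => d.insert menu (d.getD menu 0 + 1)) PySem.Dict.empty
  (counts.items.map (fun p => (pvPrice.getD p.1 5000) * p.2)).sum

-- ===== PRECONDITION & SPEC =====
def Spec_solution (order : List String) (out : Int) : Prop := out = solution_alt order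
instance (order : List String) (out : Int) : Decidable (Spec_solution order out) := by unfold Spec_solution; infer_instance

-- ===== CLAIM (what is proved, stated in full; the proofs are below) =====
def Claim_equal_solution : Prop := ∀ (order : List String), Dom_solution order → Spec_solution order (solution order)

-- ===== LEMMAS AND PROOFS =====

-- the price table agrees with A's six-name membership test
theorem pvPriceOf_eq (m : String) :
    pvPrice.getD m 5000 = if m ∈ ["iceamericano", "americanoice", "hotamericano", "americanohot", "americano", "anything"] then 4500 else 5000 := by
  have h : pvPrice = PySem.Dict.mk [("iceamericano", 4500), ("americanoice", 4500), ("hotamericano", 4500),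
                     ("americanohot", 4500), ("americano", 4500), ("anything", 4500)] := by decide
  rw [PySem.Dict.getD_eq_get?_getD, h]
  simp only [PySem.Dict.get?_mk_cons, beq_iff_eq, List.mem_cons, List.not_mem_nil, or_false]
  split_ifs with h1 h2 h3 h4 h5 h6 <;> simp_all [PySem.Dict.get?, eq_comm]

-- A's fold equals the element-wise sum of table prices
theorem solutionA_eq_sum (order : List String) (acc : Int) :
    order.foldl (fun answer menu =>
      if menu ∈ ["iceamericano", "americanoice", "hotamericano", "americanohot", "americano", "anything"]
      then answer + 4500 else answer + 5000) acc
    = acc + (order.map (fun m => pvPrice.getD m 5000)).sum := by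
  induction order generalizing acc with
  | nil => simp
  | cons m rest ih =>
    simp only [List.foldl_cons, List.map_cons, List.sum_cons, ih, pvPriceOf_eq]
    by_cases h : m ∈ ["iceamericano", "americanoice", "hotamericano", "americanohot", "americano", "anything"] <;>
      simp [h] <;> ring

-- summing price*count over the distinct menus equals the element-wise sum
theorem weighted_eq_sum (f : String → Int) (order : List String) :
    ((PySem.Set.ofList order).map (fun k => f k * (order.count k : Int))).sum
    = (order.map f).sum := by
  have hnd : (PySem.Set.ofList order).Nodup := PySem.Set.nodup_ofList order
  rw [← List.sum_toFinset _ hnd]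
  have hfs : (PySem.Set.ofList order).toFinset = order.toFinset := by
    ext x; simp [PySem.Set.mem_ofList]
  rw [hfs]
  have h := Finset.sum_multiset_map_count (order : Multiset String) f
  simp only [Multiset.map_coe, Multiset.sum_coe, List.toFinset_coe, Multiset.coe_count,
    nsmul_eq_mul] at h
  rw [h]
  exact Finset.sum_congr rfl (fun x _ => by ring)

-- ===== VERDICT (by name: the statement is the Claim_ definition above) =====
theorem solution_spec : Claim_equal_solution := by
  intro order _
  unfold Spec_solution solution solution_alt
  rw [PySem.Dict.foldl_insert_getD_add_one_eq_counter]
  show _ = (List.map (fun p => pvPrice.getD p.1 5000 * p.2) (PySem.Dict.counter order).items).sum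
  rw [PySem.Dict.items_counter, List.map_map]
  show _ = ((PySem.Set.ofList order).map (fun k => pvPrice.getD k 5000 * (order.count k : Int))).sum
  rw [weighted_eq_sum, solutionA_eq_sum]
  ring
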